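-- pv_equiv track=rewrite | github.com/UniWest/converter | converter_site/tasks.py | assemble_transcription
-- ===== SOURCE A (Python) =====
-- from typing import List, Dict, Any, Optional, Union, Tuple
--
-- def assemble_transcription(transcription_results: List[Dict[str, Any]]) -> str:
--     """
--     Собирает итоговый текст из результатов транскрибации сегментов.
--     """
--     if not transcription_results:
--         return ''
--
--     # Фильтруем пустые результаты и объединяем текст
--     texts = [result['text'].strip() for result in transcription_results if result['text'].strip()]
--
--     if not texts:
--         return ''
--
--     # Объединяем с пробелами, избегая двойных пробелов
--     full_text = ' '.join(texts)
--     full_text = ' '.join(full_text.split())  # Убираем лишние пробелы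
--
--     return full_text
-- ===== SOURCE B (Python) =====
-- from typing import List, Dict, Any
--
-- def assemble_transcription(transcription_results: List[Dict[str, Any]]) -> str:
--     out = []
--     boundary = True
--     for result in transcription_results:
--         for ch in result['text']:
--             if ch.isspace():
--                 boundary = True
--             else:
--                 if boundary and out:
--                     out.append(' ')
--                 out.append(ch)
--                 boundary = False
--         boundary = True  # segment boundary separates words
--     return ''.join(out)
-- ===== Notes on version B (the rewrite author's own statement) =====
-- stated objective: alternative
-- what changed: Replaces A's strip/filter list comprehension and two-stage join-then-resplit normalization with a single streaming character-level state machine that emits output characters directly, tracking a word-boundary flag.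
import Mathlib
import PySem

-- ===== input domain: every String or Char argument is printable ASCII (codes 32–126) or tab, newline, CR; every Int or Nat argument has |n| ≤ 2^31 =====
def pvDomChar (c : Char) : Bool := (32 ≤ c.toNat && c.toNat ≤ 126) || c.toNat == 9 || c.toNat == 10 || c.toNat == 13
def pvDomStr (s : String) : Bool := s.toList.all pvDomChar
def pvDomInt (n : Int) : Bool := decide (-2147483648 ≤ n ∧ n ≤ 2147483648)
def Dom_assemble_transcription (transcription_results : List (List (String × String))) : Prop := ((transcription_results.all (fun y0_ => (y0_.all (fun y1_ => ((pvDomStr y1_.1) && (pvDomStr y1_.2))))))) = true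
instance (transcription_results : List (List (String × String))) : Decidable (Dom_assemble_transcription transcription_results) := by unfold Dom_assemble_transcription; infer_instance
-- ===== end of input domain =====

-- B replaces A's strip/filter comprehension plus join-then-resplit normalization by a single
-- streaming character-level state machine (output chars + word-boundary flag); same cost.

-- ===== PORT A =====
def assemble_transcription (transcription_results : List (List (String × String))) : String :=
  if transcription_results = [] then "" else
  let texts := ((transcription_results.map
      (fun result => PySem.Str.strip ((PySem.Dict.mk result).getD "text" ""))).filter
      (fun t => t ≠ ""))
  if texts = [] then "" else
  let full_text := PySem.Str.join " " texts
  PySem.Str.join " " (PySem.Str.split₀ full_text)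

-- ===== PORT B =====
-- inner loop body: one character of a segment's text
def altChar (st : List Char × Bool) (ch : Char) : List Char × Bool :=
  if PySem.Chars.isspace ch then (st.1, true)
  else ((if st.2 ∧ st.1 ≠ [] then st.1 ++ [' '] else st.1) ++ [ch], false)

def assemble_transcription_alt (transcription_results : List (List (String × String))) : String :=
  String.ofList ((transcription_results.foldl
    (fun st result =>
      (((((PySem.Dict.mk result).getD "text" "").toList.foldl altChar st).1), true))
    ([], true)).1)

-- ===== PRECONDITION & SPEC =====
-- Pre_ excludes exactly the segments without a "text" key, on which Python A raises KeyError.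
def Pre_assemble_transcription (transcription_results : List (List (String × String))) : Prop :=
  ∀ result ∈ transcription_results, (PySem.Dict.mk result).contains "text" = true
instance (transcription_results : List (List (String × String))) : Decidable (Pre_assemble_transcription transcription_results) := by unfold Pre_assemble_transcription; infer_instance

def pvWitness_assemble_transcription : (List (List (String × String))) :=
  [[("text", "  hi \t there ")], [("text", "")], [("lang", "ru"), ("text", "ok")]]

def Spec_assemble_transcription (transcription_results : List (List (String × String))) (out : String) : Prop := out = assemble_transcription_alt transcription_results
instance (transcription_results : List (List (String × String))) (out : String) : Decidable (Spec_assemble_transcription transcription_results out) := by unfold Spec_assemble_transcription; infer_instance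

-- ===== CLAIM (what is proved, stated in full; the proofs are below) =====
def Claim_equal_assemble_transcription : Prop := ∀ (transcription_results : List (List (String × String))), Dom_assemble_transcription transcription_results → Pre_assemble_transcription transcription_results → Spec_assemble_transcription transcription_results (assemble_transcription transcription_results)

-- ===== LEMMAS AND PROOFS =====

theorem split0_go_acc (s : List Char) (cur : List Char) (acc : List (List Char)) :
    PySem.Chars.split₀.go s cur acc = acc.reverse ++ PySem.Chars.split₀.go s cur [] := by
  induction s generalizing cur acc with
  | nil =>
    simp only [PySem.Chars.split₀.go]
    by_cases h : cur.isEmpty <;> simp [h]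
  | cons c s ih =>
    simp only [PySem.Chars.split₀.go]
    by_cases hc : PySem.Chars.isspace c
    · by_cases h : cur.isEmpty
      · simp only [hc, h, if_true]
        exact ih [] acc
      · simp only [hc, h, if_true, if_false, Bool.false_eq_true]
        rw [ih [] (cur.reverse :: acc), ih [] [cur.reverse]]
        simp
    · simp only [hc, Bool.false_eq_true, if_false]
      exact ih (c :: cur) acc

theorem split0_go_append_space (c : Char) (hc : PySem.Chars.isspace c = true)
    (a b : List Char) (cur : List Char) (acc : List (List Char)) :
    PySem.Chars.split₀.go (a ++ c :: b) cur acc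
      = PySem.Chars.split₀.go a cur acc ++ PySem.Chars.split₀.go b [] [] := by
  induction a generalizing cur acc with
  | nil =>
    simp only [List.nil_append, PySem.Chars.split₀.go, hc, if_true]
    by_cases h : cur.isEmpty
    · simp only [h, if_true]
      exact split0_go_acc b [] acc
    · simp only [h, if_false, Bool.false_eq_true]
      rw [split0_go_acc b [] (cur.reverse :: acc)]
  | cons d a ih =>
    simp only [List.cons_append, PySem.Chars.split₀.go]
    by_cases hd : PySem.Chars.isspace d
    · by_cases h : cur.isEmpty <;> simp only [hd, h, if_true, if_false, Bool.false_eq_true] <;>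
        exact ih _ _
    · simp only [hd, Bool.false_eq_true, if_false]
      exact ih _ _

theorem split0_append_space (c : Char) (hc : PySem.Chars.isspace c = true)
    (a b : List Char) :
    PySem.Chars.split₀ (a ++ c :: b) = PySem.Chars.split₀ a ++ PySem.Chars.split₀ b :=
  split0_go_append_space c hc a b [] []

theorem split0_go_snoc_space (s : List Char) (c : Char) (hc : PySem.Chars.isspace c = true)
    (cur : List Char) (acc : List (List Char)) :
    PySem.Chars.split₀.go (s ++ [c]) cur acc = PySem.Chars.split₀.go s cur acc := by
  induction s generalizing cur acc with
  | nil =>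
    simp only [List.nil_append, PySem.Chars.split₀.go, hc, if_true]
    by_cases h : cur.isEmpty <;> simp [h]
  | cons d s ih =>
    simp only [List.cons_append, PySem.Chars.split₀.go]
    by_cases hd : PySem.Chars.isspace d
    · by_cases h : cur.isEmpty <;> simp only [hd, h, if_true, if_false, Bool.false_eq_true] <;>
        exact ih _ _
    · simp only [hd, Bool.false_eq_true, if_false]; exact ih _ _

theorem split0_snoc_space (s : List Char) (c : Char) (hc : PySem.Chars.isspace c = true) :
    PySem.Chars.split₀ (s ++ [c]) = PySem.Chars.split₀ s :=
  split0_go_snoc_space s c hc [] []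

theorem split0_cons_space (c : Char) (s : List Char) (hc : PySem.Chars.isspace c = true) :
    PySem.Chars.split₀ (c :: s) = PySem.Chars.split₀ s := by
  simp [PySem.Chars.split₀, PySem.Chars.split₀.go, hc]

theorem split0_append_allspace (w s : List Char) (hw : ∀ c ∈ w, PySem.Chars.isspace c = true) :
    PySem.Chars.split₀ (w ++ s) = PySem.Chars.split₀ s := by
  induction w with
  | nil => simp
  | cons c w ih =>
    rw [List.cons_append, split0_cons_space c _ (hw c (by simp))]
    exact ih (fun d hd => hw d (by simp [hd]))

theorem split0_snoc_allspace (s w : List Char) (hw : ∀ c ∈ w, PySem.Chars.isspace c = true) :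
    PySem.Chars.split₀ (s ++ w) = PySem.Chars.split₀ s := by
  induction w generalizing s with
  | nil => simp
  | cons c w ih =>
    have : s ++ c :: w = (s ++ [c]) ++ w := by simp
    rw [this, ih (s ++ [c]) (fun d hd => hw d (by simp [hd])),
      split0_snoc_space s c (hw c (by simp))]

theorem split0_strip (s : List Char) :
    PySem.Chars.split₀ (PySem.Chars.strip s) = PySem.Chars.split₀ s := by
  unfold PySem.Chars.strip PySem.Chars.rstrip PySem.Chars.lstrip
  have h1 : PySem.Chars.split₀ (List.dropWhile PySem.Chars.isspace s) = PySem.Chars.split₀ s := by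
    conv_rhs => rw [← List.takeWhile_append_dropWhile (p := PySem.Chars.isspace) (l := s)]
    rw [split0_append_allspace _ _ (fun c hc => List.mem_takeWhile_imp hc)]
  rw [← h1]
  set u := List.dropWhile PySem.Chars.isspace s with hu
  conv_rhs => rw [← u.reverse_reverse,
    ← List.takeWhile_append_dropWhile (p := PySem.Chars.isspace) (l := u.reverse)]
  rw [List.reverse_append]
  rw [split0_snoc_allspace _ _ (fun c hc => List.mem_takeWhile_imp (List.mem_reverse.mp hc))]

theorem split0_join (ts : List (List Char)) :
    PySem.Chars.split₀ (PySem.Chars.join [' '] ts) = ts.flatMap PySem.Chars.split₀ := by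
  induction ts with
  | nil => simp [PySem.Chars.join_nil]; rfl
  | cons t ts ih =>
    cases ts with
    | nil => simp [PySem.Chars.join_singleton]
    | cons t' rest =>
      rw [PySem.Chars.join_cons_cons, List.append_assoc, List.singleton_append,
        split0_append_space ' ' (by decide) t _, ih]
      simp

theorem words_strip (s : String) :
    PySem.Chars.split₀ (PySem.Str.strip s).toList = PySem.Chars.split₀ s.toList := by
  rw [PySem.Str.toList_strip, split0_strip]

theorem flatMap_words_filter (l : List String) :
    (l.filter (fun t => t ≠ "")).flatMap (fun t => PySem.Chars.split₀ t.toList)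
      = l.flatMap (fun t => PySem.Chars.split₀ t.toList) := by
  induction l with
  | nil => rfl
  | cons t l ih =>
    by_cases h : t = ""
    · rw [List.filter_cons_of_neg (by simp [h]), ih, List.flatMap_cons]
      subst h; rfl
    · rw [List.filter_cons_of_pos (by simp [h]), List.flatMap_cons, List.flatMap_cons, ih]

theorem key_words (l : List (List (String × String))) :
    List.map String.toList (l.flatMap
        (fun r => PySem.Str.split₀ ((PySem.Dict.mk r).getD "text" "")))
      = (((l.map (fun r => PySem.Str.strip ((PySem.Dict.mk r).getD "text" ""))).filter
            (fun t => t ≠ "")).map String.toList).flatMap PySem.Chars.split₀ := by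
  rw [List.map_flatMap, List.flatMap_map, flatMap_words_filter, List.flatMap_map]
  have h1 : (fun r : List (String × String) =>
      List.map String.toList (PySem.Str.split₀ ((PySem.Dict.mk r).getD "text" "")))
      = fun r => PySem.Chars.split₀ ((PySem.Dict.mk r).getD "text" "").toList :=
    funext fun r => PySem.Str.split₀_map_toList _
  have h2 : (fun r : List (String × String) =>
      PySem.Chars.split₀ (PySem.Str.strip ((PySem.Dict.mk r).getD "text" "")).toList)
      = fun r => PySem.Chars.split₀ ((PySem.Dict.mk r).getD "text" "").toList :=
    funext fun r => words_strip _
  rw [h1, h2]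

-- ---- new lemmas for B's state machine ----

theorem split0_go_on_word (r : List Char) (cur : List Char) (hcur : cur ≠ []) :
    PySem.Chars.split₀.go r cur []
      = (cur.reverse ++ r.takeWhile (fun d => !PySem.Chars.isspace d))
          :: PySem.Chars.split₀ (r.dropWhile (fun d => !PySem.Chars.isspace d)) := by
  induction r generalizing cur with
  | nil =>
    simp only [PySem.Chars.split₀.go, List.takeWhile_nil, List.dropWhile_nil]
    have : cur.isEmpty = false := by simpa [List.isEmpty_iff] using hcur
    simp [this]
    rfl
  | cons c r ih =>
    by_cases hc : PySem.Chars.isspace c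
    · have hcemp : cur.isEmpty = false := by simpa [List.isEmpty_iff] using hcur
      simp only [PySem.Chars.split₀.go, hc, if_true, hcemp, Bool.false_eq_true, if_false]
      rw [split0_go_acc]
      simp only [List.takeWhile_cons, List.dropWhile_cons, hc]
      simp [split0_cons_space c r hc]
      rfl
    · simp only [PySem.Chars.split₀.go, hc, Bool.false_eq_true, if_false]
      rw [ih (c :: cur) (by simp)]
      simp only [List.takeWhile_cons, List.dropWhile_cons, hc]
      simp

theorem split0_cons_nonspace (c : Char) (r : List Char) (hc : PySem.Chars.isspace c = false) :
    PySem.Chars.split₀ (c :: r)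
      = (c :: r.takeWhile (fun d => !PySem.Chars.isspace d))
          :: PySem.Chars.split₀ (r.dropWhile (fun d => !PySem.Chars.isspace d)) := by
  show PySem.Chars.split₀.go (c :: r) [] [] = _
  simp only [PySem.Chars.split₀.go, hc, Bool.false_eq_true, if_false]
  rw [split0_go_on_word r [c] (by simp)]
  simp

theorem split0_go_nonnil (s : List Char) (cur : List Char) (acc : List (List Char))
    (hacc : [] ∉ acc) : [] ∉ PySem.Chars.split₀.go s cur acc := by
  induction s generalizing cur acc with
  | nil =>
    simp only [PySem.Chars.split₀.go]
    by_cases h : cur.isEmpty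
    · simpa [h] using fun hm => hacc (List.mem_reverse.mp hm)
    · simp only [h, Bool.false_eq_true, if_false]
      intro hm
      rcases List.mem_cons.mp (List.mem_reverse.mp hm) with h1 | h1
      · exact absurd h1.symm (by simpa [List.isEmpty_iff, List.reverse_eq_nil_iff] using h)
      · exact hacc h1
  | cons c s ih =>
    simp only [PySem.Chars.split₀.go]
    by_cases hc : PySem.Chars.isspace c
    · by_cases h : cur.isEmpty
      · simp only [hc, h, if_true]; exact ih _ _ hacc
      · simp only [hc, h, if_true, Bool.false_eq_true, if_false]
        refine ih _ _ ?_
        intro hm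
        rcases List.mem_cons.mp hm with h1 | h1
        · exact absurd h1.symm (by simpa [List.isEmpty_iff, List.reverse_eq_nil_iff] using h)
        · exact hacc h1
    · simp only [hc, Bool.false_eq_true, if_false]; exact ih _ _ hacc

theorem split0_nonnil (s : List Char) : [] ∉ PySem.Chars.split₀ s :=
  split0_go_nonnil s [] [] (by simp)

theorem join_cons_flat (w : List Char) (vs : List (List Char)) :
    PySem.Chars.join [' '] (w :: vs) = w ++ vs.flatMap (fun v => ' ' :: v) := by
  induction vs generalizing w with
  | nil => simp [PySem.Chars.join_singleton]
  | cons v vs ih =>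
    rw [PySem.Chars.join_cons_cons, ih v]
    simp

theorem join_append_flat (ws vs : List (List Char)) (h : ws ≠ []) :
    PySem.Chars.join [' '] (ws ++ vs)
      = PySem.Chars.join [' '] ws ++ vs.flatMap (fun v => ' ' :: v) := by
  rcases ws with _ | ⟨w, ws⟩
  · exact absurd rfl h
  · rw [List.cons_append, join_cons_flat, join_cons_flat, List.flatMap_append]
    simp

theorem mach_both (cs : List Char) : ∀ out : List Char, out ≠ [] →
    ((cs.foldl altChar (out, true)).1
        = out ++ (PySem.Chars.split₀ cs).flatMap (fun w => ' ' :: w))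
    ∧ ((cs.foldl altChar (out, false)).1
        = out ++ cs.takeWhile (fun d => !PySem.Chars.isspace d)
            ++ (PySem.Chars.split₀ (cs.dropWhile (fun d => !PySem.Chars.isspace d))).flatMap
                  (fun w => ' ' :: w)) := by
  induction cs with
  | nil =>
    intro out hout
    constructor <;> simp [PySem.Chars.split₀, PySem.Chars.split₀.go]
  | cons c r ih =>
    intro out hout
    by_cases hc : PySem.Chars.isspace c
    · constructor
      · rw [List.foldl_cons, show altChar (out, true) c = (out, true) by simp [altChar, hc],
          (ih out hout).1, split0_cons_space c r hc]
      · rw [List.foldl_cons, show altChar (out, false) c = (out, true) by simp [altChar, hc],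
          (ih out hout).1]
        simp [hc, split0_cons_space c r hc]
    · have hc' : PySem.Chars.isspace c = false := by simpa using hc
      constructor
      · rw [List.foldl_cons,
          show altChar (out, true) c = (out ++ [' '] ++ [c], false) by
            simp [altChar, hc', hout],
          (ih (out ++ [' '] ++ [c]) (by simp)).2,
          split0_cons_nonspace c r hc']
        simp
      · rw [List.foldl_cons,
          show altChar (out, false) c = (out ++ [c], false) by simp [altChar, hc'],
          (ih (out ++ [c]) (by simp)).2]
        simp [hc']

theorem mach_empty (cs : List Char) :
    (cs.foldl altChar ([], true)).1 = PySem.Chars.join [' '] (PySem.Chars.split₀ cs) := by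
  induction cs with
  | nil => simp; rfl
  | cons c r ih =>
    by_cases hc : PySem.Chars.isspace c
    · rw [List.foldl_cons, show altChar ([], true) c = ([], true) by simp [altChar, hc],
        ih, split0_cons_space c r hc]
    · have hc' : PySem.Chars.isspace c = false := by simpa using hc
      rw [List.foldl_cons,
        show altChar ([], true) c = ([c], false) by simp [altChar, hc'],
        (mach_both r [c] (by simp)).2,
        split0_cons_nonspace c r hc', join_cons_flat]
      simp

theorem join_ne_nil (ws : List (List Char)) (h : [] ∉ ws) (hne : ws ≠ []) :
    PySem.Chars.join [' '] ws ≠ [] := by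
  rcases ws with _ | ⟨w, ws⟩
  · exact absurd rfl hne
  · rw [join_cons_flat]
    have : w ≠ [] := fun hw => h (by simp [hw])
    intro hcontra
    exact this (List.append_eq_nil_iff.mp hcontra).1

theorem seg_fold (trs : List (List (String × String))) : ∀ ws : List (List Char), [] ∉ ws →
    ((trs.foldl
        (fun st result =>
          (((((PySem.Dict.mk result).getD "text" "").toList.foldl altChar st).1), true))
        (PySem.Chars.join [' '] ws, true)).1)
      = PySem.Chars.join [' ']
          (ws ++ trs.flatMap
            (fun r => PySem.Chars.split₀ ((PySem.Dict.mk r).getD "text" "").toList)) := by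
  induction trs with
  | nil => intro ws _; simp
  | cons r rest ih =>
    intro ws hws
    rw [List.foldl_cons]
    rcases eq_or_ne ws [] with hemp | hne
    · subst hemp
      rw [show PySem.Chars.join [' '] ([] : List (List Char)) = [] from PySem.Chars.join_nil _,
        mach_empty]
      have := ih (PySem.Chars.split₀ ((PySem.Dict.mk r).getD "text" "").toList)
        (split0_nonnil _)
      rw [this]
      simp
    · have hJ : PySem.Chars.join [' '] ws ≠ [] := join_ne_nil ws hws hne
      rw [(mach_both ((PySem.Dict.mk r).getD "text" "").toList _ hJ).1,
        ← join_append_flat ws _ hne]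
      have hmem : [] ∉ ws ++ PySem.Chars.split₀ ((PySem.Dict.mk r).getD "text" "").toList := by
        intro hm
        rcases List.mem_append.mp hm with h1 | h1
        · exact hws h1
        · exact split0_nonnil _ h1
      rw [ih _ hmem]
      simp

theorem alt_eq_flat (trs : List (List (String × String))) :
    assemble_transcription_alt trs
      = PySem.Str.join " " (trs.flatMap
          (fun r => PySem.Str.split₀ ((PySem.Dict.mk r).getD "text" ""))) := by
  apply String.toList_injective
  unfold assemble_transcription_alt
  rw [show (([] : List Char), true) = (PySem.Chars.join [' '] ([] : List (List Char)), true) by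
      rw [PySem.Chars.join_nil]]
  rw [PySem.Str.toList_join, List.map_flatMap]
  have h1 : (fun r : List (String × String) =>
      List.map String.toList (PySem.Str.split₀ ((PySem.Dict.mk r).getD "text" "")))
      = fun r => PySem.Chars.split₀ ((PySem.Dict.mk r).getD "text" "").toList :=
    funext fun r => PySem.Str.split₀_map_toList _
  rw [h1]
  have h2 := seg_fold trs [] (by simp)
  simp only [List.nil_append] at h2
  simpa using h2

theorem main_eq (trs : List (List (String × String))) :
    assemble_transcription trs = assemble_transcription_alt trs := by
  rw [alt_eq_flat]
  unfold assemble_transcription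
  by_cases h1 : trs = []
  · rw [if_pos h1, h1]; rfl
  rw [if_neg h1]
  by_cases h2 : ((trs.map
      (fun result => PySem.Str.strip ((PySem.Dict.mk result).getD "text" ""))).filter
      (fun t => t ≠ "")) = []
  · rw [if_pos h2]
    have := key_words trs
    rw [h2] at this
    simp only [List.map_nil, List.flatMap_nil] at this
    rw [List.map_eq_nil_iff.mp this]
    rfl
  · rw [if_neg h2]
    apply String.toList_injective
    rw [PySem.Str.toList_join, PySem.Str.toList_join, PySem.Str.split₀_map_toList,
      PySem.Str.toList_join]
    simp only [show " ".toList = [' '] from rfl]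
    rw [split0_join, key_words trs]

-- ===== VERDICT (by name: the statement is the Claim_ definition above) =====
theorem assemble_transcription_spec : Claim_equal_assemble_transcription := by
  intro trs _ _
  show assemble_transcription trs = assemble_transcription_alt trs
  exact main_eq trs
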